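-- pv_equiv track=rewrite | github.com/zivnaim/Magnet | MultipartiteCommunityDetection/code/louvain_like.py | __renumber
-- ===== SOURCE A (Python) =====
-- def __renumber(dictionary):
--     """Renumber the values of the dictionary (i.e. communities) from 0 to n"""
--     count = 0
--     ret = dictionary.copy()
--     new_values = {}
--
--     for key in dictionary.keys():
--         value = dictionary[key]
--         new_value = new_values.get(value, -1)
--         if new_value == -1:
--             new_values[value] = count
--             new_value = count
--             count += 1
--         ret[key] = new_value
--
--     return ret
-- ===== SOURCE B (Python) =====
-- def __renumber(dictionary):
--     """Renumber the values of the dictionary (i.e. communities) from 0 to n"""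
--     values = list(dictionary.values())
--     first = {}
--     for i, v in enumerate(values):
--         first.setdefault(v, i)
--     rank = {pos: r for r, pos in enumerate(sorted(first.values()))}
--     return {k: rank[first[v]] for k, v in dictionary.items()}
-- ===== Notes on version B (the rewrite author's own statement) =====
-- stated objective: alternative
-- what changed: Instead of A's interleaved counter loop that hands out ids while overwriting a copied dict, B records each value's first-occurrence position, sorts those positions and ranks them, then maps every item to the rank of its value's first position.
import Mathlib
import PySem

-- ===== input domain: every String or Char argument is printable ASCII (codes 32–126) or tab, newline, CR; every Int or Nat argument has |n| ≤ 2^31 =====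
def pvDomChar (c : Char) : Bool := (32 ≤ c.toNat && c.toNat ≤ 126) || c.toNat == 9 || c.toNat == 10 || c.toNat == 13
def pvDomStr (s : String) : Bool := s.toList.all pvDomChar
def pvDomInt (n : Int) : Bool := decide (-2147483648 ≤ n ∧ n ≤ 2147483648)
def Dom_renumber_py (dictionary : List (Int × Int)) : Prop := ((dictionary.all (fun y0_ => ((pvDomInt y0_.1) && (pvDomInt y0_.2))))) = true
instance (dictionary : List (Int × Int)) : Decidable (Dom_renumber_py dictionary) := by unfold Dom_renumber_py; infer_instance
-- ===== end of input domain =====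

-- B replaces A's interleaved counter loop (which hands out ids while overwriting a copied
-- dict) by a different algorithm: record each value's first-occurrence position, sort those
-- positions and rank them, then map every item to the rank of its value's first position.

-- ===== PORT A =====
-- transliteration of A: count = 0; ret = dictionary.copy(); new_values = {}; loop over keys
def renumber_py (dictionary : List (Int × Int)) : List (Int × Int) :=
  let d : PySem.Dict Int Int := PySem.Dict.mk dictionary
  let s := (PySem.Dict.keys d).foldl
    (fun (st : Int × PySem.Dict Int Int × PySem.Dict Int Int) key =>
      -- dictionary[key]: key is drawn from dictionary.keys(), so it is always present
      let value := PySem.Dict.getD d key 0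
      let new_value := PySem.Dict.getD st.2.2 value (-1)
      if new_value == -1 then
        (st.1 + 1, (st.2.1).insert key st.1, (st.2.2).insert value st.1)
      else
        (st.1, (st.2.1).insert key new_value, st.2.2))
    (0, d, PySem.Dict.empty)
  (s.2.1).items

-- ===== PORT B =====
-- transliteration of B: first.setdefault(v, i) over enumerate(values);
-- rank = {pos: r for r, pos in enumerate(sorted(first.values()))};
-- return {k: rank[first[v]] for k, v in dictionary.items()}
def renumber_py_alt (dictionary : List (Int × Int)) : List (Int × Int) :=
  let values := dictionary.map (fun p => p.2)
  let first := (PySem.List.enumerate values).foldl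
    (fun (m : PySem.Dict Int Int) iv => m.setdefault iv.2 iv.1) PySem.Dict.empty
  let rank := (PySem.List.enumerate (PySem.List.sorted first.values (fun x => x) false)).foldl
    (fun (m : PySem.Dict Int Int) rp => m.insert rp.2 rp.1) PySem.Dict.empty
  -- first[v] / rank[...]: every value occurs in `values`, so both lookups always hit
  dictionary.map (fun p => (p.1, rank.getD (first.getD p.2 0) 0))

-- ===== PRECONDITION & SPEC =====
-- Pre_ requires distinct keys: a list with duplicate keys does not represent a Python dict,
-- so A (whose argument is a dict) never receives such an input.
def Pre_renumber_py (dictionary : List (Int × Int)) : Prop :=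
  (dictionary.map Prod.fst).Nodup
instance (dictionary : List (Int × Int)) : Decidable (Pre_renumber_py dictionary) := by
  unfold Pre_renumber_py; infer_instance
def pvWitness_renumber_py : (List (Int × Int)) := [(1, 5), (2, 5), (3, 7), (4, 5)]

def Spec_renumber_py (dictionary : List (Int × Int)) (out : List (Int × Int)) : Prop := out = renumber_py_alt dictionary
instance (dictionary : List (Int × Int)) (out : List (Int × Int)) : Decidable (Spec_renumber_py dictionary out) := by unfold Spec_renumber_py; infer_instance

-- ===== CLAIM (what is proved, stated in full; the proofs are below) =====
def Claim_equal_renumber_py : Prop := ∀ (dictionary : List (Int × Int)), Dom_renumber_py dictionary → Pre_renumber_py dictionary → Spec_renumber_py dictionary (renumber_py dictionary)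

-- ===== LEMMAS AND PROOFS =====

-- the value every key is finally mapped to: first-appearance index of its value
def pvIdx (all : List (Int × Int)) (p : Int × Int) : Int × Int :=
  (p.1, ((PySem.List.dedup (all.map Prod.snd)).idxOf p.2 : Int))

-- the index table of a list: element ↦ its position
def pvTab (l : List Int) : PySem.Dict Int Int :=
  PySem.Dict.mk ((PySem.List.enumerate l).map (fun iv => (iv.2, iv.1)))

-- the value->id table after the values `vals` have been seen
def pvNV (vals : List Int) : PySem.Dict Int Int := pvTab (PySem.List.dedup vals)

lemma pvTab_keys (l : List Int) : (pvTab l).keys = l := by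
  simp only [pvTab, PySem.Dict.keys, List.map_map]
  exact PySem.List.map_snd_enumerate l 0

lemma pvTab_getD (l : List Int) (hnd : l.Nodup) (v d0 : Int) :
    (pvTab l).getD v d0 = if v ∈ l then (l.idxOf v : Int) else d0 := by
  have hk : ((pvTab l).keys).Nodup := by rw [pvTab_keys]; exact hnd
  split_ifs with h
  · apply PySem.Dict.getD_of_mem_items (d := pvTab l) (k := v) (v := (l.idxOf v : Int)) _ hk
    have hlt : l.idxOf v < l.length := List.idxOf_lt_length_of_mem h
    have : ((0 : Int) + l.idxOf v, l[l.idxOf v]) ∈ PySem.List.enumerate l 0 := by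
      rw [PySem.List.mem_enumerate_iff]
      exact ⟨_, hlt, rfl⟩
    rw [List.getElem_idxOf] at this
    have hm := List.mem_map_of_mem (f := fun iv : Int × Int => (iv.2, iv.1)) this
    simpa [pvTab, PySem.Dict.items] using hm
  · apply PySem.Dict.getD_of_not_contains
    rw [PySem.Dict.contains_eq_decide_mem_keys, pvTab_keys]
    simpa using h

lemma pvNV_keys (vals : List Int) : (pvNV vals).keys = PySem.List.dedup vals :=
  pvTab_keys _

lemma pvNV_getD (vals : List Int) (v d0 : Int) :
    (pvNV vals).getD v d0 =
      if v ∈ PySem.List.dedup vals then ((PySem.List.dedup vals).idxOf v : Int) else d0 :=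
  pvTab_getD _ (by simp [PySem.Set.nodup_ofList]) v d0

lemma pv_foldl_insert (qs : List (Int × Int)) (h : (qs.map Prod.fst).Nodup) :
    qs.foldl (fun m q => m.insert q.1 q.2) PySem.Dict.empty = PySem.Dict.mk qs := by
  induction qs using List.reverseRecOn with
  | nil => rfl
  | append_singleton qs q ih =>
    rw [List.map_append] at h
    have h1 : (qs.map Prod.fst).Nodup := (List.nodup_append.mp h).1
    have h2 : q.1 ∉ qs.map Prod.fst := fun hm =>
      absurd rfl ((List.nodup_append.mp h).2.2 _ hm q.1 (by simp))
    rw [List.foldl_append, ih h1, List.foldl_cons, List.foldl_nil]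
    apply PySem.Dict.ext
    rw [PySem.Dict.items_insert_of_not_contains]
    rw [PySem.Dict.contains_eq_decide_mem_keys]
    simpa [PySem.Dict.keys] using h2

-- the rank-building foldl of B produces the index table of its (nodup) input list
lemma pv_rank_eq (l : List Int) (hnd : l.Nodup) :
    (PySem.List.enumerate l).foldl (fun m rp => m.insert rp.2 rp.1) PySem.Dict.empty
      = pvTab l := by
  have h := pv_foldl_insert ((PySem.List.enumerate l).map (fun iv => (iv.2, iv.1)))
    (by
      have hk : (((PySem.List.enumerate l).map (fun iv : Int × Int => (iv.2, iv.1))).map Prod.fst)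
          = l := by
        rw [List.map_map]
        exact PySem.List.map_snd_enumerate l 0
      rw [hk]; exact hnd)
  rw [List.foldl_map] at h
  exact h

lemma pv_idx_prefix (xs ys : List Int) (v : Int) (h : v ∈ PySem.List.dedup xs) :
    (PySem.List.dedup (xs ++ ys)).idxOf v = (PySem.List.dedup xs).idxOf v := by
  have hsp : PySem.List.dedup (xs ++ ys)
      = PySem.List.dedup xs ++ (PySem.Set.ofList ys).filter
          (fun y => !(PySem.Set.contains (PySem.Set.ofList xs) y)) := by
    simp only [PySem.List.dedup_eq_ofList, PySem.Set.ofList_append, PySem.Set.update_eq_append_filter]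
  rw [hsp]
  exact List.idxOf_append_of_mem h

lemma pv_insert_mid (a b : List (Int × Int)) (k v w : Int)
    (ha : k ∉ a.map Prod.fst) (hb : k ∉ b.map Prod.fst) :
    (PySem.Dict.mk (a ++ (k, v) :: b)).insert k w = PySem.Dict.mk (a ++ (k, w) :: b) := by
  have key : ∀ (l : List (Int × Int)), k ∉ l.map Prod.fst →
      l.map (fun p => if p.1 == k then (k, w) else p) = l := by
    intro l hl
    have hc : l.map (fun p => if p.1 == k then (k, w) else p) = l.map id := by
      apply List.map_congr_left
      intro p hp
      have : p.1 ≠ k := fun he => hl (he ▸ List.mem_map_of_mem hp)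
      simp [this]
    simpa using hc
  apply PySem.Dict.ext
  rw [PySem.Dict.items_insert_of_contains]
  · show (a ++ (k, v) :: b).map (fun p => if p.1 == k then (k, w) else p) = _
    rw [List.map_append, List.map_cons, key a ha, key b hb]
    norm_num
  · rw [PySem.Dict.contains_eq_decide_mem_keys]
    simp [PySem.Dict.keys]

lemma pv_loopA (all : List (Int × Int)) (hnd : (all.map Prod.fst).Nodup) :
    ∀ (rest pref : List (Int × Int)), all = pref ++ rest →
    (rest.map Prod.fst).foldl
      (fun (st : Int × PySem.Dict Int Int × PySem.Dict Int Int) key =>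
        let value := PySem.Dict.getD (PySem.Dict.mk all) key 0
        let new_value := PySem.Dict.getD st.2.2 value (-1)
        if new_value == -1 then
          (st.1 + 1, (st.2.1).insert key st.1, (st.2.2).insert value st.1)
        else
          (st.1, (st.2.1).insert key new_value, st.2.2))
      (((PySem.List.dedup (pref.map Prod.snd)).length : Int),
        PySem.Dict.mk (pref.map (pvIdx all) ++ rest), pvNV (pref.map Prod.snd))
    = (((PySem.List.dedup (all.map Prod.snd)).length : Int),
        PySem.Dict.mk (all.map (pvIdx all)), pvNV (all.map Prod.snd)) := by
  intro rest
  induction rest with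
  | nil =>
    intro pref h
    simp [h]
  | cons q rest' ih =>
    intro pref h
    obtain ⟨k, v⟩ := q
    have hsplit : all.map Prod.snd = pref.map Prod.snd ++ v :: rest'.map Prod.snd := by
      rw [h]; simp
    have hkv : (k, v) ∈ all := by rw [h]; simp
    have hka : k ∉ pref.map Prod.fst := by
      rw [h, List.map_append] at hnd
      intro hm
      exact absurd rfl ((List.nodup_append.mp hnd).2.2 _ hm k (by simp))
    have hkb : k ∉ rest'.map Prod.fst := by
      rw [h, List.map_append] at hnd
      have := (List.nodup_append.mp hnd).2.1
      simp only [List.map_cons, List.nodup_cons] at this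
      exact this.1
    have hfst : (pref.map (pvIdx all)).map Prod.fst = pref.map Prod.fst := by
      simp [pvIdx, Function.comp]
    have hval : PySem.Dict.getD (PySem.Dict.mk all) k 0 = v := by
      exact PySem.Dict.getD_of_mem_items _ hkv (by simpa [PySem.Dict.keys] using hnd) 0
    rw [List.map_cons, List.foldl_cons]
    simp only [hval, pvNV_getD]
    by_cases hv : v ∈ PySem.List.dedup (pref.map Prod.snd)
    · -- value already seen: else branch
      rw [if_pos hv]
      rw [if_neg (by simp)]
      have hidx : (PySem.List.dedup (all.map Prod.snd)).idxOf v
          = (PySem.List.dedup (pref.map Prod.snd)).idxOf v := by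
        rw [hsplit]; exact pv_idx_prefix _ _ _ hv
      have hdd : PySem.List.dedup ((pref ++ [(k, v)]).map Prod.snd)
          = PySem.List.dedup (pref.map Prod.snd) := by
        simp only [List.map_append, List.map_cons, List.map_nil, PySem.List.dedup_eq_ofList,
          PySem.Set.ofList_append_singleton]
        exact PySem.Set.add_of_mem (by simpa using hv)
      have hins : (PySem.Dict.mk (pref.map (pvIdx all) ++ (k, v) :: rest')).insert k
            ((PySem.List.dedup (pref.map Prod.snd)).idxOf v : Int)
          = PySem.Dict.mk ((pref ++ [(k, v)]).map (pvIdx all) ++ rest') := by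
        rw [pv_insert_mid _ _ _ _ _ (hfst ▸ hka) hkb]
        simp only [List.map_append, List.map_cons, List.map_nil, pvIdx, hidx,
          List.append_assoc, List.cons_append, List.nil_append]
      rw [hins]
      have hnv' : pvNV ((pref ++ [(k, v)]).map Prod.snd) = pvNV (pref.map Prod.snd) := by
        unfold pvNV; rw [hdd]
      have := ih (pref ++ [(k, v)]) (by rw [h]; simp)
      rw [hdd, hnv'] at this
      exact this
    · -- new value: then branch
      rw [if_neg hv, if_pos (by simp)]
      have hvP : v ∉ PySem.Set.ofList (pref.map Prod.snd) := by simpa using hv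
      have hdd : PySem.List.dedup ((pref ++ [(k, v)]).map Prod.snd)
          = PySem.List.dedup (pref.map Prod.snd) ++ [v] := by
        simp only [List.map_append, List.map_cons, List.map_nil, PySem.List.dedup_eq_ofList,
          PySem.Set.ofList_append_singleton]
        exact PySem.Set.add_of_not_mem hvP
      have hmemnew : v ∈ PySem.List.dedup ((pref ++ [(k, v)]).map Prod.snd) := by
        rw [hdd]; simp
      have hidx : (PySem.List.dedup (all.map Prod.snd)).idxOf v
          = (PySem.List.dedup (pref.map Prod.snd)).length := by
        have h2 : all.map Prod.snd = (pref ++ [(k, v)]).map Prod.snd ++ rest'.map Prod.snd := by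
          rw [h]; simp
        rw [h2, pv_idx_prefix _ _ _ hmemnew, hdd,
          List.idxOf_append_of_notMem (by simpa using hv)]
        simp
      have hins : (PySem.Dict.mk (pref.map (pvIdx all) ++ (k, v) :: rest')).insert k
            ((PySem.List.dedup (pref.map Prod.snd)).length : Int)
          = PySem.Dict.mk ((pref ++ [(k, v)]).map (pvIdx all) ++ rest') := by
        rw [pv_insert_mid _ _ _ _ _ (hfst ▸ hka) hkb]
        simp only [List.map_append, List.map_cons, List.map_nil, pvIdx, hidx,
          List.append_assoc, List.cons_append, List.nil_append]
      have hnv : (pvNV (pref.map Prod.snd)).insert v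
            ((PySem.List.dedup (pref.map Prod.snd)).length : Int)
          = pvNV ((pref ++ [(k, v)]).map Prod.snd) := by
        apply PySem.Dict.ext
        rw [PySem.Dict.items_insert_of_not_contains _ _
          (by rw [PySem.Dict.contains_eq_decide_mem_keys, pvNV_keys]; simpa using hv)]
        show _ ++ [(v, _)] = (PySem.List.enumerate (PySem.List.dedup ((pref ++ [(k, v)]).map Prod.snd))).map _
        rw [hdd, PySem.List.enumerate_append, List.map_append]
        simp [pvNV, pvTab, PySem.List.enumerate_cons, PySem.List.enumerate_nil]
      have hcnt : ((PySem.List.dedup (pref.map Prod.snd)).length : Int) + 1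
          = ((PySem.List.dedup ((pref ++ [(k, v)]).map Prod.snd)).length : Int) := by
        rw [hdd]; simp
      rw [hins, hnv, hcnt]
      exact ih (pref ++ [(k, v)]) (by rw [h]; simp)

-- B-side: the `first` loop produces the dict of (value, first-occurrence index) pairs
lemma pv_first_eq (vals : List Int) :
    (PySem.List.enumerate vals).foldl (fun m iv => m.setdefault iv.2 iv.1) PySem.Dict.empty
      = PySem.Dict.mk ((PySem.List.dedup vals).map (fun w => (w, (vals.idxOf w : Int)))) := by
  induction vals using List.reverseRecOn with
  | nil => rfl
  | append_singleton vals v ih =>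
    have hkeys : (PySem.Dict.mk ((PySem.List.dedup vals).map
        (fun w => (w, (vals.idxOf w : Int))))).keys = PySem.List.dedup vals := by
      simp only [PySem.Dict.keys, List.map_map]
      exact List.map_id' _
    rw [PySem.List.enumerate_append, List.foldl_append, ih,
      PySem.List.enumerate_cons, PySem.List.enumerate_nil]
    simp only [List.foldl_cons, List.foldl_nil]
    by_cases hv : v ∈ vals
    · have hdd : PySem.List.dedup (vals ++ [v]) = PySem.List.dedup vals := by
        simp only [PySem.List.dedup_eq_ofList, PySem.Set.ofList_append_singleton]
        exact PySem.Set.add_of_mem (by simpa using hv)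
      rw [PySem.Dict.setdefault_of_contains _ _
        (by rw [PySem.Dict.contains_eq_decide_mem_keys, hkeys]; simpa [PySem.List.mem_dedup])]
      rw [hdd]
      congr 1
      apply List.map_congr_left
      intro w hw
      rw [List.idxOf_append_of_mem ((PySem.List.mem_dedup _ _).mp hw)]
    · have hdd : PySem.List.dedup (vals ++ [v]) = PySem.List.dedup vals ++ [v] := by
        simp only [PySem.List.dedup_eq_ofList, PySem.Set.ofList_append_singleton]
        exact PySem.Set.add_of_not_mem (by simpa using hv)
      have hcont : (PySem.Dict.mk ((PySem.List.dedup vals).map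
          (fun w => (w, (vals.idxOf w : Int))))).contains v = false := by
        rw [PySem.Dict.contains_eq_decide_mem_keys, hkeys]
        simpa [PySem.List.mem_dedup]
      rw [PySem.Dict.setdefault_of_not_contains _ _ hcont]
      apply PySem.Dict.ext
      rw [PySem.Dict.items_insert_of_not_contains _ _ hcont]
      show _ ++ [(v, _)]
          = (PySem.List.dedup (vals ++ [v])).map (fun w => (w, ((vals ++ [v]).idxOf w : Int)))
      rw [hdd, List.map_append]
      congr 1
      · apply List.map_congr_left
        intro w hw
        rw [List.idxOf_append_of_mem ((PySem.List.mem_dedup _ _).mp hw)]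
      · simp [List.idxOf_append_of_notMem hv]

-- first-occurrence indices are strictly increasing along the first-appearance order
lemma pv_mono (vals : List Int) :
    (PySem.List.dedup vals).Pairwise (fun a b => vals.idxOf a < vals.idxOf b) := by
  induction vals using List.reverseRecOn with
  | nil => simp [PySem.List.dedup_eq_ofList, PySem.Set.ofList]
  | append_singleton vals v ih =>
    by_cases hv : v ∈ vals
    · have hdd : PySem.List.dedup (vals ++ [v]) = PySem.List.dedup vals := by
        simp only [PySem.List.dedup_eq_ofList, PySem.Set.ofList_append_singleton]
        exact PySem.Set.add_of_mem (by simpa using hv)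
      rw [hdd]
      refine List.Pairwise.imp_of_mem ?_ ih
      intro a b ha hb hab
      rw [List.idxOf_append_of_mem ((PySem.List.mem_dedup _ _).mp ha),
        List.idxOf_append_of_mem ((PySem.List.mem_dedup _ _).mp hb)]
      exact hab
    · have hdd : PySem.List.dedup (vals ++ [v]) = PySem.List.dedup vals ++ [v] := by
        simp only [PySem.List.dedup_eq_ofList, PySem.Set.ofList_append_singleton]
        exact PySem.Set.add_of_not_mem (by simpa using hv)
      rw [hdd, List.pairwise_append]
      refine ⟨List.Pairwise.imp_of_mem ?_ ih, by simp, ?_⟩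
      · intro a b ha hb hab
        rw [List.idxOf_append_of_mem ((PySem.List.mem_dedup _ _).mp ha),
          List.idxOf_append_of_mem ((PySem.List.mem_dedup _ _).mp hb)]
        exact hab
      · intro a ha b hb
        rw [List.mem_singleton] at hb
        subst hb
        rw [List.idxOf_append_of_mem ((PySem.List.mem_dedup _ _).mp ha),
          List.idxOf_append_of_notMem hv]
        have := List.idxOf_lt_length_of_mem ((PySem.List.mem_dedup _ _).mp ha)
        simpa using this

-- indexing commutes with a strictly order-preserving map
lemma pv_idxOf_map (l : List Int) (f : Int → Int)
    (hp : l.Pairwise (fun a b => f a < f b)) (v : Int) (hv : v ∈ l) :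
    (l.map f).idxOf (f v) = l.idxOf v := by
  induction l with
  | nil => cases hv
  | cons x xs ih =>
    rcases List.mem_cons.mp hv with h | h
    · subst h; simp
    · have hx : f x < f v := (List.pairwise_cons.mp hp).1 v h
      have hne1 : f x ≠ f v := ne_of_lt hx
      have hne2 : x ≠ v := fun he => absurd (he ▸ hx) (lt_irrefl _)
      rw [List.map_cons, List.idxOf_cons_ne _ hne1, List.idxOf_cons_ne _ hne2,
        ih (List.pairwise_cons.mp hp).2 h]

-- ===== VERDICT (by name: the statement is the Claim_ definition above) =====
set_option maxHeartbeats 1600000 in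
theorem renumber_py_spec : Claim_equal_renumber_py := by
  intro dictionary _ hpre
  unfold Spec_renumber_py renumber_py renumber_py_alt
  dsimp only
  -- A's loop computes the first-appearance ids
  have hloop := pv_loopA dictionary hpre dictionary [] rfl
  simp only [List.map_nil, List.nil_append] at hloop
  have hkeys : PySem.Dict.keys (PySem.Dict.mk dictionary) = dictionary.map Prod.fst := rfl
  have h1 : ((PySem.List.dedup ([] : List Int)).length : Int) = 0 := rfl
  have h2 : pvNV ([] : List Int) = PySem.Dict.empty := rfl
  rw [h1, h2] at hloop
  rw [hkeys, hloop]
  show dictionary.map (pvIdx dictionary) = _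
  -- B's pipeline: name the value list and the first-occurrence data
  have hB : ∀ vals : List Int,
      vals = dictionary.map (fun p => p.2) →
      dictionary.map (pvIdx dictionary)
        = dictionary.map (fun p => (p.1,
            ((PySem.List.enumerate
                (PySem.List.sorted
                  ((PySem.List.enumerate vals).foldl
                    (fun (m : PySem.Dict Int Int) iv => m.setdefault iv.2 iv.1)
                    PySem.Dict.empty).values (fun x => x) false)).foldl
              (fun (m : PySem.Dict Int Int) rp => m.insert rp.2 rp.1)
              PySem.Dict.empty).getD
              (((PySem.List.enumerate vals).foldl
                  (fun (m : PySem.Dict Int Int) iv => m.setdefault iv.2 iv.1)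
                  PySem.Dict.empty).getD p.2 0) 0)) := by
    intro vals hvals
    have hmono := pv_mono vals
    have hvalsF : ((PySem.Dict.mk ((PySem.List.dedup vals).map
        (fun w => (w, (vals.idxOf w : Int))))).values)
        = (PySem.List.dedup vals).map (fun w => (vals.idxOf w : Int)) := by
      simp [PySem.Dict.values, List.map_map, Function.comp]
    have hpair : ((PySem.List.dedup vals).map (fun w => (vals.idxOf w : Int))).Pairwise
        (fun a b => a < b) := by
      rw [List.pairwise_map]
      exact hmono.imp (fun h => by exact_mod_cast h)
    have hnd : ((PySem.List.dedup vals).map (fun w => (vals.idxOf w : Int))).Nodup :=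
      hpair.imp (fun h => ne_of_lt h)
    rw [pv_first_eq vals, hvalsF,
      PySem.List.sorted_eq_self_of_pairwise _ _ (hpair.imp (fun h => le_of_lt h)),
      pv_rank_eq _ hnd]
    apply List.map_congr_left
    intro p hp
    have hvmem : p.2 ∈ vals := by
      rw [hvals]; exact List.mem_map_of_mem hp
    have hdmem : p.2 ∈ PySem.List.dedup vals := (PySem.List.mem_dedup _ _).mpr hvmem
    have hFnd : ((PySem.Dict.mk ((PySem.List.dedup vals).map
        (fun w => (w, (vals.idxOf w : Int))))).keys).Nodup := by
      have hk : (PySem.Dict.mk ((PySem.List.dedup vals).map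
          (fun w => (w, (vals.idxOf w : Int))))).keys = PySem.List.dedup vals := by
        simp only [PySem.Dict.keys, List.map_map]
        exact List.map_id' _
      rw [hk]
      simp [PySem.Set.nodup_ofList]
    have hgetF : (PySem.Dict.mk ((PySem.List.dedup vals).map
        (fun w => (w, (vals.idxOf w : Int))))).getD p.2 0 = (vals.idxOf p.2 : Int) := by
      exact PySem.Dict.getD_of_mem_items _
        (List.mem_map_of_mem (f := fun w => (w, (vals.idxOf w : Int))) hdmem) hFnd 0
    have hmonoZ : (PySem.List.dedup vals).Pairwise
        (fun a b => ((vals.idxOf a : Int)) < ((vals.idxOf b : Int))) :=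
      hmono.imp (fun h => by exact_mod_cast h)
    have hidx := pv_idxOf_map (PySem.List.dedup vals)
      (fun w => (vals.idxOf w : Int)) hmonoZ p.2 hdmem
    simp only [] at hidx
    rw [hgetF, pvTab_getD _ hnd, if_pos (List.mem_map_of_mem hdmem), hidx]
    subst hvals
    rfl
  exact hB (dictionary.map (fun p => p.2)) rfl
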